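-- pv_equiv track=rewrite | github.com/Swathi933657/Swathi | 5 interview answers/advanced control flow.py | filter_numbers
-- ===== SOURCE A (Python) =====
-- def filter_numbers(nums):
--     result = []
--     for n in nums:
--         if n < 0:
--             break              # stop if negative
--         if n % 3 == 0:
--             continue           # skip multiples of 3
--         result.append(n)
--     return result
-- ===== SOURCE B (Python) =====
-- def filter_numbers(nums):
--     # Right-to-left scan: a negative element discards everything collected
--     # after it, so only the prefix before the first negative survives.
--     # acc is built in reverse order and flipped once at the end.
--     acc = []
--     for n in reversed(nums):
--         if n < 0:
--             acc.clear()
--         elif n % 3 != 0: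
--             acc.append(n)
--     return acc[::-1]
-- ===== Notes on version B (the rewrite author's own statement) =====
-- stated objective: alternative
-- what changed: Replaces the left-to-right loop with break/continue by a right-to-left fold over reversed(nums) whose accumulator is reset to empty by any negative element, so the stop-at-first-negative behaviour emerges from the reset invariant instead of control flow.
import Mathlib
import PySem

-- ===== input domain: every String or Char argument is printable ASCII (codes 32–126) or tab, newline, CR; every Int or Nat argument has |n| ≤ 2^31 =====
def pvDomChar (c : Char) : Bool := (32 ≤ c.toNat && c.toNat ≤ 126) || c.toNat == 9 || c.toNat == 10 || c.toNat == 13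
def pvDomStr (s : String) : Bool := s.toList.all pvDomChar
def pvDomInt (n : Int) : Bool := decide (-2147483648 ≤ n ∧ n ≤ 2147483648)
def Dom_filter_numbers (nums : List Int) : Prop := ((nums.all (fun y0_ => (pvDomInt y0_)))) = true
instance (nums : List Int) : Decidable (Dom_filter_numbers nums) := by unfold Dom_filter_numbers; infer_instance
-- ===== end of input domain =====

-- B scans right-to-left, resetting the accumulator on a negative element (alternative decomposition, same cost).
-- ===== PORT A =====
-- A's for-loop with break/continue, carried as recursion over nums with the accumulated result.
def filterNumbersLoop (nums : List Int) (result : List Int) : List Int :=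
  match nums with
  | [] => result
  | n :: rest =>
    if n < 0 then result                                   -- break
    else if n % 3 == 0 then filterNumbersLoop rest result  -- continue
    else filterNumbersLoop rest (result ++ [n])

def filter_numbers (nums : List Int) : List Int :=
  filterNumbersLoop nums []

-- ===== PORT B =====
-- B's 'for n in reversed(nums)' loop updating acc, as a foldl over nums.reverse.
def filter_numbers_alt (nums : List Int) : List Int :=
  (nums.reverse.foldl
    (fun acc n => if n < 0 then [] else if n % 3 ≠ 0 then acc ++ [n] else acc) []).reverse

-- ===== PRECONDITION & SPEC =====
def Spec_filter_numbers (nums : List Int) (out : List Int) : Prop := out = filter_numbers_alt nums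
instance (nums : List Int) (out : List Int) : Decidable (Spec_filter_numbers nums out) := by unfold Spec_filter_numbers; infer_instance

-- ===== CLAIM (what is proved, stated in full; the proofs are below) =====
def Claim_equal_filter_numbers : Prop := ∀ (nums : List Int), Dom_filter_numbers nums → Spec_filter_numbers nums (filter_numbers nums)

-- ===== LEMMAS AND PROOFS =====
-- B's loop builds the reversed answer; the un-reversed fold is the structural foldr.
theorem fold_rev (l acc : List Int) :
    (l.foldl (fun acc n => if n < 0 then [] else if n % 3 ≠ 0 then acc ++ [n] else acc)
      acc.reverse).reverse
      = l.foldl (fun acc n => if n < 0 then [] else if n % 3 ≠ 0 then [n] ++ acc else acc) acc := by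
  induction l generalizing acc with
  | nil => simp
  | cons n rest ih =>
    simp only [List.foldl_cons]
    by_cases h : n < 0
    · simpa [h] using ih ([] : List Int)
    · by_cases h3 : n % 3 = 0
      · simpa [h, h3] using ih acc
      · simpa [h, h3] using ih (n :: acc)

theorem alt_eq_foldr (nums : List Int) :
    filter_numbers_alt nums =
      nums.foldr (fun n acc => if n < 0 then [] else if n % 3 ≠ 0 then [n] ++ acc else acc) [] := by
  have := fold_rev nums.reverse ([] : List Int)
  simp only [List.reverse_nil] at this
  rw [filter_numbers_alt, this, List.foldl_reverse]

theorem filterNumbersLoop_eq (nums acc : List Int) :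
    filterNumbersLoop nums acc = acc ++ filter_numbers_alt nums := by
  induction nums generalizing acc with
  | nil => simp [filterNumbersLoop, filter_numbers_alt]
  | cons n rest ih =>
    rw [filterNumbersLoop, alt_eq_foldr, List.foldr_cons, ← alt_eq_foldr]
    by_cases h : n < 0
    · simp [h]
    · by_cases h3 : n % 3 = 0
      · simp [h, h3, ih]
      · simp [h, h3, ih]

-- ===== VERDICT (by name: the statement is the Claim_ definition above) =====
theorem filter_numbers_spec : Claim_equal_filter_numbers := by
  intro nums _
  show filter_numbers nums = filter_numbers_alt nums
  simpa using filterNumbersLoop_eq nums []
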